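-- pv_equiv track=rewrite | github.com/ayoubzulfiqar/Leetcode-Medium | ValidSquare/valid_square.py | validSquare
-- ===== SOURCE A (Python) =====
-- import collections
--
-- def validSquare(p1: list[int], p2: list[int], p3: list[int], p4: list[int]) -> bool:
--     points = [p1, p2, p3, p4]
--
--     def dist_sq(point_a, point_b):
--         return (point_a[0] - point_b[0])**2 + (point_a[1] - point_b[1])**2
--
--     squared_distances = []
--     for i in range(4):
--         for j in range(i + 1, 4):
--             squared_distances.append(dist_sq(points[i], points[j]))
--
--     counts = collections.Counter(squared_distances)
--
--     if len(counts) != 2: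
--         return False
--
--     sorted_items = sorted(counts.items())
--
--     side_sq, side_count = sorted_items[0]
--     diag_sq, diag_count = sorted_items[1]
--
--     if side_sq == 0:
--         return False
--
--     if side_count != 4:
--         return False
--
--     if diag_count != 2:
--         return False
--
--     if 2 * side_sq != diag_sq:
--         return False
--
--     return True
-- ===== SOURCE B (Python) =====
-- def validSquare(p1: list[int], p2: list[int], p3: list[int], p4: list[int]) -> bool:
--     def dist_sq(a, b):
--         return (a[0] - b[0]) ** 2 + (a[1] - b[1]) ** 2
--
--     def is_square_cycle(a, b, c, d):
--         # a -> b -> c -> d traversed as a cycle: four equal positive sides,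
--         # both diagonals equal to twice the squared side
--         s = dist_sq(a, b)
--         return (s > 0
--                 and dist_sq(b, c) == s
--                 and dist_sq(c, d) == s
--                 and dist_sq(d, a) == s
--                 and dist_sq(a, c) == 2 * s
--                 and dist_sq(b, d) == 2 * s)
--
--     return (is_square_cycle(p1, p2, p3, p4)
--             or is_square_cycle(p1, p3, p2, p4)
--             or is_square_cycle(p1, p2, p4, p3))
-- ===== Notes on version B (the rewrite author's own statement) =====
-- stated objective: alternative
-- what changed: B abandons A's distance-multiset classification (Counter of all 6 distances, count checks): it searches the three possible cyclic vertex orders of the four points and checks the square pattern positionally per order (four equal positive sides around the cycle, both diagonals equal to twice the side); correctness of the search over integer points rests on the impossibility of an equilateral lattice triangle, which the Lean proof establishes.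
import Mathlib
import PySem

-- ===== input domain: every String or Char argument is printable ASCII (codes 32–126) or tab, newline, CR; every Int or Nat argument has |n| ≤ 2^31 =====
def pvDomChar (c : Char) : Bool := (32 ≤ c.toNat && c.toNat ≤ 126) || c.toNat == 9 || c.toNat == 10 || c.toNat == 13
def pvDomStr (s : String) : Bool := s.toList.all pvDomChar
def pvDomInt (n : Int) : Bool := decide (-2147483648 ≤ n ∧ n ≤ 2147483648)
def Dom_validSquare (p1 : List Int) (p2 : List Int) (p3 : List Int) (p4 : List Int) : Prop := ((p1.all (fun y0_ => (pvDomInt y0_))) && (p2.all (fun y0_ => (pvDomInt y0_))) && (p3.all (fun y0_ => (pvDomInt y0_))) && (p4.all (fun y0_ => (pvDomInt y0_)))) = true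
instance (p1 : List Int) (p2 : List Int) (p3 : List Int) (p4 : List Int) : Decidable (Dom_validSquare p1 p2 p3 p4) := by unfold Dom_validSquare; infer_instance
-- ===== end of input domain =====

-- B replaces A's distance-multiset classification (Counter + count checks) by a search over the
-- three possible cyclic vertex orders, checking the side/diagonal pattern positionally per order
-- (objective: alternative algorithm; agreement on integer points uses the impossibility of an
-- equilateral lattice triangle, proved below).

-- ===== PORT A =====
def pvDistSq (a : List Int) (b : List Int) : Int :=
  (PySem.List.pyGetD a 0 0 - PySem.List.pyGetD b 0 0) ^ 2 +
  (PySem.List.pyGetD a 1 0 - PySem.List.pyGetD b 1 0) ^ 2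

def validSquare (p1 : List Int) (p2 : List Int) (p3 : List Int) (p4 : List Int) : Bool :=
  let points : List (List Int) := [p1, p2, p3, p4]
  let squaredDistances : List Int :=
    (PySem.List.pyRange 0 4 1).foldl (fun acc i =>
      (PySem.List.pyRange (i + 1) 4 1).foldl (fun acc2 j =>
        acc2 ++ [pvDistSq (PySem.List.pyGetD points i []) (PySem.List.pyGetD points j [])]) acc) []
  let counts := PySem.Dict.counter squaredDistances
  if counts.size ≠ 2 then false
  else
    let sortedItems := PySem.List.sorted2 counts.items Prod.fst Prod.snd
    -- indexing sortedItems[0] / [1] is guarded by the size == 2 check, so pyGetD is exact here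
    let sideItem := PySem.List.pyGetD sortedItems 0 (0, 0)
    let diagItem := PySem.List.pyGetD sortedItems 1 (0, 0)
    if sideItem.1 == 0 then false
    else if sideItem.2 ≠ 4 then false
    else if diagItem.2 ≠ 2 then false
    else if 2 * sideItem.1 ≠ diagItem.1 then false
    else true

-- ===== PORT B =====
def pvBDist (a : List Int) (b : List Int) : Int :=
  (PySem.List.pyGetD a 0 0 - PySem.List.pyGetD b 0 0) ^ 2 +
  (PySem.List.pyGetD a 1 0 - PySem.List.pyGetD b 1 0) ^ 2

def pvSqCycle (a : List Int) (b : List Int) (c : List Int) (d : List Int) : Bool :=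
  let s := pvBDist a b
  decide (0 < s) &&
  (pvBDist b c == s) &&
  (pvBDist c d == s) &&
  (pvBDist d a == s) &&
  (pvBDist a c == 2 * s) &&
  (pvBDist b d == 2 * s)

def validSquare_alt (p1 : List Int) (p2 : List Int) (p3 : List Int) (p4 : List Int) : Bool :=
  pvSqCycle p1 p2 p3 p4 || pvSqCycle p1 p3 p2 p4 || pvSqCycle p1 p2 p4 p3

-- ===== PRECONDITION & SPEC =====
-- Pre_ excludes exactly the inputs on which the Python A raises IndexError: some point
-- has fewer than two coordinates (both Pythons index point[0] and point[1]).
def Pre_validSquare (p1 : List Int) (p2 : List Int) (p3 : List Int) (p4 : List Int) : Prop :=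
  2 ≤ p1.length ∧ 2 ≤ p2.length ∧ 2 ≤ p3.length ∧ 2 ≤ p4.length
instance (p1 : List Int) (p2 : List Int) (p3 : List Int) (p4 : List Int) : Decidable (Pre_validSquare p1 p2 p3 p4) := by unfold Pre_validSquare; infer_instance

def pvWitness_validSquare : List Int × List Int × List Int × List Int :=
  ([0, 0], [0, 1], [1, 0], [1, 1])

def Spec_validSquare (p1 : List Int) (p2 : List Int) (p3 : List Int) (p4 : List Int) (out : Bool) : Prop := out = validSquare_alt p1 p2 p3 p4
instance (p1 : List Int) (p2 : List Int) (p3 : List Int) (p4 : List Int) (out : Bool) : Decidable (Spec_validSquare p1 p2 p3 p4 out) := by unfold Spec_validSquare; infer_instance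

-- ===== CLAIM (what is proved, stated in full; the proofs are below) =====
def Claim_equal_validSquare : Prop := ∀ (p1 : List Int) (p2 : List Int) (p3 : List Int) (p4 : List Int), Dom_validSquare p1 p2 p3 p4 → Pre_validSquare p1 p2 p3 p4 → Spec_validSquare p1 p2 p3 p4 (validSquare p1 p2 p3 p4)

-- ===== LEMMAS AND PROOFS =====

-- The tail of port A from the Counter on, as a function of the distance list.
def pvACheck (l : List Int) : Bool :=
  let counts := PySem.Dict.counter l
  if counts.size ≠ 2 then false
  else
    let sortedItems := PySem.List.sorted2 counts.items Prod.fst Prod.snd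
    let sideItem := PySem.List.pyGetD sortedItems 0 (0, 0)
    let diagItem := PySem.List.pyGetD sortedItems 1 (0, 0)
    if sideItem.1 == 0 then false
    else if sideItem.2 ≠ 4 then false
    else if diagItem.2 ≠ 2 then false
    else if 2 * sideItem.1 ≠ diagItem.1 then false
    else true

def pvDists (p1 p2 p3 p4 : List Int) : List Int :=
  [pvDistSq p1 p2, pvDistSq p1 p3, pvDistSq p1 p4, pvDistSq p2 p3, pvDistSq p2 p4, pvDistSq p3 p4]

theorem validSquare_eq_check (p1 p2 p3 p4 : List Int) :
    validSquare p1 p2 p3 p4 = pvACheck (pvDists p1 p2 p3 p4) := rfl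

def pvSquareProp (l : List Int) : Prop :=
  ∃ x y : Int, x < y ∧ x ≠ 0 ∧ l.count x = 4 ∧ l.count y = 2 ∧ (∀ z ∈ l, z = x ∨ z = y) ∧ 2 * x = y

theorem pvProp_set_len (l : List Int) (h : pvSquareProp l) : (PySem.Set.ofList l).length = 2 := by
  obtain ⟨x, y, hxy, hx0, hcx, hcy, hall, h2⟩ := h
  have hxl : x ∈ l := List.count_pos_iff.mp (by rw [hcx]; norm_num)
  have hyl : y ∈ l := List.count_pos_iff.mp (by rw [hcy]; norm_num)
  have hne : x ≠ y := ne_of_lt hxy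
  have hnd := PySem.Set.nodup_ofList l
  have hsub1 : (PySem.Set.ofList l : List Int) ⊆ [x, y] := by
    intro z hz
    have := hall z ((PySem.Set.mem_ofList l z).mp hz)
    simp [this]
  have hsub2 : [x, y] ⊆ (PySem.Set.ofList l : List Int) := by
    intro z hz
    simp only [List.mem_cons, List.not_mem_nil, or_false] at hz
    rcases hz with rfl | rfl
    · exact (PySem.Set.mem_ofList l z).mpr hxl
    · exact (PySem.Set.mem_ofList l z).mpr hyl
  have h1 := (hnd.subperm hsub1).length_le
  have h2' := ((List.nodup_cons.mpr ⟨by simp [hne], List.nodup_singleton y⟩).subperm hsub2).length_le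
  simp at h1 h2'
  omega

theorem pvACheck_iff (l : List Int) : pvACheck l = true ↔ pvSquareProp l := by
  have hitems := PySem.Dict.items_counter l
  have hsize : (PySem.Dict.counter l).size = (PySem.Set.ofList l).length := by
    simp [PySem.Dict.size, hitems]
  unfold pvACheck
  dsimp only
  by_cases hS : (PySem.Set.ofList l).length = 2
  · obtain ⟨u, v, huv⟩ := List.length_eq_two.mp (by simpa [hsize] using hS)
    have hnd := PySem.Set.nodup_ofList l
    rw [huv] at hnd
    have hne : u ≠ v := by simp [List.nodup_cons] at hnd; exact hnd
    have hmem : ∀ z, z ∈ l ↔ (z = u ∨ z = v) := by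
      intro z; rw [← PySem.Set.mem_ofList, huv]; simp
    have hul : u ∈ l := (hmem u).mpr (Or.inl rfl)
    have hvl : v ∈ l := (hmem v).mpr (Or.inr rfl)
    rw [hsize, if_neg (by simp [hS])]
    rw [hitems, huv]
    simp only [List.map]
    rcases lt_or_gt_of_ne hne with hlt | hlt
    · have hsort : PySem.List.sorted2 [(u, (l.count u : Int)), (v, (l.count v : Int))] Prod.fst Prod.snd
          = [(u, (l.count u : Int)), (v, (l.count v : Int))] := by
        simp [PySem.List.sorted2, PySem.List.insertBy, hlt, not_lt_of_gt hlt]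
      simp only [hsort]
      simp only [pysem, List.getD_cons_zero, List.getD_cons_succ]
      constructor
      · intro h
        split_ifs at h with h1 h2 h3 h4
        simp only [beq_iff_eq] at h1
        exact ⟨u, v, hlt, h1, by omega, by omega, fun z hz => (hmem z).mp hz, by omega⟩
      · rintro ⟨x, y, hxy, hx0, hcx, hcy, hall, h2⟩
        have hxuv := (hmem x).mp (List.count_pos_iff.mp (by rw [hcx]; norm_num))
        have hyuv := (hmem y).mp (List.count_pos_iff.mp (by rw [hcy]; norm_num))
        have hxu : x = u ∧ y = v := by
          rcases hxuv with rfl | rfl <;> rcases hyuv with rfl | rfl <;> omega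
        obtain ⟨rfl, rfl⟩ := hxu
        rw [if_neg (by simp [hx0]), if_neg (by omega), if_neg (by omega), if_neg (by omega)]
    · have hsort : PySem.List.sorted2 [(u, (l.count u : Int)), (v, (l.count v : Int))] Prod.fst Prod.snd
          = [(v, (l.count v : Int)), (u, (l.count u : Int))] := by
        simp [PySem.List.sorted2, PySem.List.insertBy, hlt]
      simp only [hsort]
      simp only [pysem, List.getD_cons_zero, List.getD_cons_succ]
      constructor
      · intro h
        split_ifs at h with h1 h2 h3 h4
        simp only [beq_iff_eq] at h1
        exact ⟨v, u, hlt, h1, by omega, by omega, fun z hz => ((hmem z).mp hz).symm, by omega⟩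
      · rintro ⟨x, y, hxy, hx0, hcx, hcy, hall, h2⟩
        have hxuv := (hmem x).mp (List.count_pos_iff.mp (by rw [hcx]; norm_num))
        have hyuv := (hmem y).mp (List.count_pos_iff.mp (by rw [hcy]; norm_num))
        have hxu : x = v ∧ y = u := by
          rcases hxuv with rfl | rfl <;> rcases hyuv with rfl | rfl <;> omega
        obtain ⟨rfl, rfl⟩ := hxu
        rw [if_neg (by simp [hx0]), if_neg (by omega), if_neg (by omega), if_neg (by omega)]
  · rw [hsize, if_pos hS]
    constructor
    · intro h; cases h
    · intro h; exact absurd (pvProp_set_len l h) hS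

-- ---- B-side machinery ----

theorem pvBDist_eq (a b : List Int) : pvBDist a b = pvDistSq a b := rfl

theorem pvDistSq_comm (a b : List Int) : pvDistSq a b = pvDistSq b a := by
  unfold pvDistSq; ring

-- No nonzero integer solutions of 4*m^2 = 3*n^2 (descent on the prime 3).
theorem pvDescent : ∀ (n m : ℕ), 4 * m ^ 2 = 3 * n ^ 2 → n = 0 := by
  intro n
  induction n using Nat.strong_induction_on with
  | _ n ih =>
    intro m h
    rcases Nat.eq_zero_or_pos n with h0 | hpos
    · exact h0
    have h3m : 3 ∣ m := by
      have hd : (3 : ℕ) ∣ m ^ 2 * 4 := ⟨n ^ 2, by omega⟩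
      exact Nat.Prime.dvd_of_dvd_pow (by norm_num)
        ((Nat.Coprime.dvd_of_dvd_mul_right (by decide) hd))
    obtain ⟨k, rfl⟩ := h3m
    have h3n : 3 ∣ n := by
      have hd : (3 : ℕ) ∣ n ^ 2 * 3 := ⟨n ^ 2, by ring⟩
      have hn2 : n ^ 2 = 3 * (4 * k ^ 2) := by ring_nf at h ⊢; omega
      exact Nat.Prime.dvd_of_dvd_pow (by norm_num) ⟨4 * k ^ 2, hn2⟩
    obtain ⟨j, rfl⟩ := h3n
    have hj : 4 * k ^ 2 = 3 * j ^ 2 := by ring_nf at h ⊢; omega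
    have := ih j (by omega) k hj
    omega

-- An equilateral triangle with positive squared side cannot have integer coordinates.
theorem pvNoEquilInt (a0 a1 b0 b1 c0 c1 x : Int) (hx : 0 < x)
    (h1 : (a0 - b0) ^ 2 + (a1 - b1) ^ 2 = x)
    (h2 : (a0 - c0) ^ 2 + (a1 - c1) ^ 2 = x)
    (h3 : (b0 - c0) ^ 2 + (b1 - c1) ^ 2 = x) : False := by
  set p : Int := (b0 - a0) * (c0 - a0) + (b1 - a1) * (c1 - a1) with hp_def
  set cr : Int := (b0 - a0) * (c1 - a1) - (b1 - a1) * (c0 - a0) with hcr_def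
  have hp : 2 * p = x := by rw [hp_def]; linear_combination h1 + h2 - h3
  have key : cr ^ 2 + p ^ 2 = x ^ 2 := by
    rw [hcr_def, hp_def]
    linear_combination ((c0 - a0) ^ 2 + (c1 - a1) ^ 2) * h1 + x * h2
  have hfin : 4 * cr ^ 2 = 3 * x ^ 2 := by linear_combination 4 * key - (2 * p + x) * hp
  have hnat : 4 * cr.natAbs ^ 2 = 3 * x.natAbs ^ 2 := by
    have := congrArg Int.natAbs hfin
    simpa [Int.natAbs_mul, Int.natAbs_pow] using this
  have := pvDescent x.natAbs cr.natAbs hnat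
  omega

theorem pvNoEquil (a b c : List Int) (x : Int) (hx : 0 < x)
    (h1 : pvDistSq a b = x) (h2 : pvDistSq a c = x) (h3 : pvDistSq b c = x) : False := by
  unfold pvDistSq at h1 h2 h3
  exact pvNoEquilInt _ _ _ _ _ _ x hx h1 h2 h3

theorem pvSqCycle_true (a b c d : List Int) (x : Int) (hx : 0 < x)
    (hab : pvBDist a b = x) (hbc : pvBDist b c = x) (hcd : pvBDist c d = x)
    (hda : pvBDist d a = x) (hac : pvBDist a c = 2 * x) (hbd : pvBDist b d = 2 * x) :
    pvSqCycle a b c d = true := by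
  simp [pvSqCycle, hab, hbc, hcd, hda, hac, hbd, hx]

-- the three disjoint "big pair" configurations, in canonical hypothesis orientation
theorem pvCyc1 (p1 p2 p3 p4 : List Int) (x : Int) (hx : 0 < x)
    (h12 : pvDistSq p1 p2 = x) (h13 : pvDistSq p1 p3 = 2 * x) (h14 : pvDistSq p1 p4 = x)
    (h23 : pvDistSq p2 p3 = x) (h24 : pvDistSq p2 p4 = 2 * x) (h34 : pvDistSq p3 p4 = x) :
    pvSqCycle p1 p2 p3 p4 = true :=
  pvSqCycle_true p1 p2 p3 p4 x hx h12 h23 h34 (by rw [pvBDist_eq, pvDistSq_comm]; exact h14) h13 h24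

theorem pvCyc2 (p1 p2 p3 p4 : List Int) (x : Int) (hx : 0 < x)
    (h12 : pvDistSq p1 p2 = 2 * x) (h13 : pvDistSq p1 p3 = x) (h14 : pvDistSq p1 p4 = x)
    (h23 : pvDistSq p2 p3 = x) (h24 : pvDistSq p2 p4 = x) (h34 : pvDistSq p3 p4 = 2 * x) :
    pvSqCycle p1 p3 p2 p4 = true :=
  pvSqCycle_true p1 p3 p2 p4 x hx h13 (by rw [pvBDist_eq, pvDistSq_comm]; exact h23) h24
    (by rw [pvBDist_eq, pvDistSq_comm]; exact h14) h12 h34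

theorem pvCyc3 (p1 p2 p3 p4 : List Int) (x : Int) (hx : 0 < x)
    (h12 : pvDistSq p1 p2 = x) (h13 : pvDistSq p1 p3 = x) (h14 : pvDistSq p1 p4 = 2 * x)
    (h23 : pvDistSq p2 p3 = 2 * x) (h24 : pvDistSq p2 p4 = x) (h34 : pvDistSq p3 p4 = x) :
    pvSqCycle p1 p2 p4 p3 = true :=
  pvSqCycle_true p1 p2 p4 p3 x hx h12 h24 (by rw [pvBDist_eq, pvDistSq_comm]; exact h34)
    (by rw [pvBDist_eq, pvDistSq_comm]; exact h13) h14 h23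

theorem pvProp_to_alt (p1 p2 p3 p4 : List Int)
    (h : pvSquareProp (pvDists p1 p2 p3 p4)) : validSquare_alt p1 p2 p3 p4 = true := by
  obtain ⟨x, y, hxy, hx0, hcx, hcy, hall, h2⟩ := h
  subst h2
  have hx : 0 < x := by omega
  have h12 := hall (pvDistSq p1 p2) (by simp [pvDists])
  have h13 := hall (pvDistSq p1 p3) (by simp [pvDists])
  have h14 := hall (pvDistSq p1 p4) (by simp [pvDists])
  have h23 := hall (pvDistSq p2 p3) (by simp [pvDists])
  have h24 := hall (pvDistSq p2 p4) (by simp [pvDists])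
  have h34 := hall (pvDistSq p3 p4) (by simp [pvDists])
  simp only [pvDists] at hcx
  simp only [validSquare_alt, Bool.or_eq_true]
  rcases h12 with h12 | h12 <;> rcases h13 with h13 | h13 <;> rcases h14 with h14 | h14 <;>
    rcases h23 with h23 | h23 <;> rcases h24 with h24 | h24 <;> rcases h34 with h34 | h34 <;>
  first
  | exact Or.inl (Or.inl (pvCyc1 p1 p2 p3 p4 x hx h12 h13 h14 h23 h24 h34))
  | exact Or.inl (Or.inr (pvCyc2 p1 p2 p3 p4 x hx h12 h13 h14 h23 h24 h34))
  | exact Or.inr (pvCyc3 p1 p2 p3 p4 x hx h12 h13 h14 h23 h24 h34)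
  | exact (pvNoEquil p2 p3 p4 x hx h23 h24 h34).elim
  | exact (pvNoEquil p1 p3 p4 x hx h13 h14 h34).elim
  | exact (pvNoEquil p1 p2 p4 x hx h12 h14 h24).elim
  | exact (pvNoEquil p1 p2 p3 x hx h12 h13 h23).elim
  | (rw [h12, h13, h14, h23, h24, h34] at hcx;
     simp only [List.count_cons, List.count_nil, beq_iff_eq] at hcx;
     split_ifs at hcx <;> omega)

theorem pvProp_of_counts (l : List Int) (s : Int) (hs : 0 < s)
    (hc1 : l.count s = 4) (hc2 : l.count (2 * s) = 2)
    (hall : ∀ z ∈ l, z = s ∨ z = 2 * s) : pvSquareProp l :=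
  ⟨s, 2 * s, by omega, by omega, hc1, hc2, hall, rfl⟩

theorem pvProp_of_lit (l : List Int) (s : Int) (hs : 0 < s)
    (hl : l = [s, 2 * s, s, s, 2 * s, s] ∨ l = [2 * s, s, s, s, s, 2 * s] ∨
          l = [s, s, 2 * s, 2 * s, s, s]) : pvSquareProp l := by
  refine pvProp_of_counts l s hs ?_ ?_ ?_ <;>
    rcases hl with rfl | rfl | rfl <;>
    first
    | (simp only [List.count_cons, List.count_nil, beq_iff_eq]; split_ifs <;> omega)
    | (intro z hz; simp only [List.mem_cons, List.not_mem_nil, or_false] at hz; tauto)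

theorem pvAlt_to_prop (p1 p2 p3 p4 : List Int)
    (h : validSquare_alt p1 p2 p3 p4 = true) : pvSquareProp (pvDists p1 p2 p3 p4) := by
  simp only [validSquare_alt, Bool.or_eq_true] at h
  rcases h with (h | h) | h <;>
    simp only [pvSqCycle, pvBDist_eq, Bool.and_eq_true, beq_iff_eq, decide_eq_true_eq] at h <;>
    obtain ⟨⟨⟨⟨⟨h0, hbc⟩, hcd⟩, hda⟩, hac⟩, hbd⟩ := h
  · refine pvProp_of_lit _ (pvDistSq p1 p2) h0 (Or.inl ?_)
    simp only [pvDists]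
    rw [hbc, hcd, hac, hbd, pvDistSq_comm p1 p4, hda]
  · refine pvProp_of_lit _ (pvDistSq p1 p3) h0 (Or.inr (Or.inl ?_))
    simp only [pvDists]
    rw [hac, hbd, pvDistSq_comm p1 p4, hda, pvDistSq_comm p2 p3, hbc, hcd]
  · refine pvProp_of_lit _ (pvDistSq p1 p2) h0 (Or.inr (Or.inr ?_))
    simp only [pvDists]
    rw [hbc, hac, hbd, pvDistSq_comm p1 p3, hda, pvDistSq_comm p3 p4, hcd]

-- ===== VERDICT (by name: the statement is the Claim_ definition above) =====
theorem validSquare_spec : Claim_equal_validSquare := by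
  intro p1 p2 p3 p4 _ _
  unfold Spec_validSquare
  rw [validSquare_eq_check]
  have hiff : pvACheck (pvDists p1 p2 p3 p4) = true ↔ validSquare_alt p1 p2 p3 p4 = true :=
    (pvACheck_iff _).trans ⟨pvProp_to_alt p1 p2 p3 p4, pvAlt_to_prop p1 p2 p3 p4⟩
  cases hA : pvACheck (pvDists p1 p2 p3 p4) <;> cases hB : validSquare_alt p1 p2 p3 p4 <;>
    simp_all
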